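-- pv_equiv track=rewrite | github.com/YoHanKi/BOJ-PGS-coding-test | 프로그래머스/1/92334. 신고 결과 받기/신고 결과 받기.py | solution
-- ===== SOURCE A (Python) =====
-- def solution(id_list, report, k):
--     id_set = set()
--     for r in report:
--         reporter, reported = r.split()
--         id_set.add((reporter, reported))
--
--     count_dict = {name : 0 for name in id_list}
--     report_dict = {name : set() for name in id_list}
--
--     for reporter, reported in id_set:
--         report_dict[reporter].add(reported)
--         count_dict[reported] += 1
--
--
--     answer = []
--     for name in id_list:
--         cnt = 0
--         for reported in report_dict[name]:
--                 cnt += (count_dict[reported] >= k)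
--         answer.append(cnt)
--
--     return answer
-- ===== SOURCE B (Python) =====
-- def solution(id_list, report, k):
--     edges = []
--     for r in report:
--         e = tuple(r.split())
--         if e not in edges:
--             edges.append(e)
--     targets = [b for _, b in edges]
--     banned = [b for b in targets if targets.count(b) >= k]
--     return [sum(1 for a, b in edges if a == name and b in banned)
--             for name in id_list]
-- ===== Notes on version B (the rewrite author's own statement) =====
-- stated objective: simpler
-- what changed: B uses no dicts or sets at all: it dedupes the reports into a plain edge list, derives a banned list by count() over the reported column, and answers each name by one comprehension over the whole edge list, removing A's count_dict/report_dict hash aggregation and per-reporter adjacency sets.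
import Mathlib
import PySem

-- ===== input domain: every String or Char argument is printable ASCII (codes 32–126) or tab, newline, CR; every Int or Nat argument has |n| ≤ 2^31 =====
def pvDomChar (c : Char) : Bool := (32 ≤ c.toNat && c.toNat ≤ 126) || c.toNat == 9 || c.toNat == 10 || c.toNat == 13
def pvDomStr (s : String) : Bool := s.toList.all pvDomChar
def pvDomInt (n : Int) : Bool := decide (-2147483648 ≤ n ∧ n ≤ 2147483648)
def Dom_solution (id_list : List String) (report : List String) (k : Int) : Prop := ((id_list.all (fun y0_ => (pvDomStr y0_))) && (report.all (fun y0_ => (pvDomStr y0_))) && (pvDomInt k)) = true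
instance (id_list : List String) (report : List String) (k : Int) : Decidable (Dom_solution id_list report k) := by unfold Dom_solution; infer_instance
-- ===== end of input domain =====

-- B drops A's hash aggregation (count_dict / report_dict of per-reporter sets) entirely:
-- a plain deduplicated edge list, a count()-based banned list, and one comprehension over
-- the edges per name (objective: simpler).

-- ===== PORT A =====
-- 'reporter, reported = r.split()' raises ValueError unless exactly two tokens; the getD 0/1
-- defaults only totalise the port — Pre_solution excludes those inputs.
def solution (id_list : List String) (report : List String) (k : Int) : List Int :=
  let id_set : PySem.Set (String × String) :=
    report.foldl (fun s r =>
      let parts := PySem.Str.split₀ r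
      PySem.Set.add s (parts.getD 0 "", parts.getD 1 "")) PySem.Set.empty
  let count_dict0 : PySem.Dict String Int :=
    id_list.foldl (fun d name => d.insert name 0) PySem.Dict.empty
  let report_dict0 : PySem.Dict String (PySem.Set String) :=
    id_list.foldl (fun d name => d.insert name PySem.Set.empty) PySem.Dict.empty
  -- 'report_dict[reporter].add(reported)' / 'count_dict[reported] += 1' raise KeyError for
  -- unknown names; the getD defaults only totalise the port — Pre_solution excludes those inputs.
  let rc : PySem.Dict String (PySem.Set String) × PySem.Dict String Int :=
    id_set.foldl (fun rc e =>
      (rc.1.insert e.1 (PySem.Set.add (rc.1.getD e.1 PySem.Set.empty) e.2),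
       rc.2.insert e.2 (rc.2.getD e.2 0 + 1))) (report_dict0, count_dict0)
  id_list.foldl (fun answer name =>
    answer ++ [(rc.1.getD name PySem.Set.empty).foldl
      (fun cnt reported => cnt + (if rc.2.getD reported 0 ≥ k then 1 else 0)) 0]) []

-- ===== PORT B =====
def solution_alt (id_list : List String) (report : List String) (k : Int) : List Int :=
  let edges : List (String × String) :=
    report.foldl (fun es r =>
      let parts := PySem.Str.split₀ r
      let e := (parts.getD 0 "", parts.getD 1 "")
      if e ∈ es then es else es ++ [e]) []
  let targets : List String := edges.map (fun e => e.2)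
  let banned : List String := targets.filter (fun b => (targets.count b : Int) ≥ k)
  id_list.map (fun name =>
    edges.foldl (fun s e => s + (if e.1 == name && banned.contains e.2 then (1:Int) else 0)) 0)

-- ===== PRECONDITION & SPEC =====
-- Exactly the inputs where Python A returns: every report splits into exactly two
-- whitespace-separated tokens (else ValueError) and both tokens are known ids (else KeyError).
def Pre_solution (id_list : List String) (report : List String) (k : Int) : Prop :=
  ∀ r ∈ report, (PySem.Str.split₀ r).length = 2 ∧
    (PySem.Str.split₀ r).getD 0 "" ∈ id_list ∧ (PySem.Str.split₀ r).getD 1 "" ∈ id_list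
instance (id_list : List String) (report : List String) (k : Int) : Decidable (Pre_solution id_list report k) := by unfold Pre_solution; infer_instance

def pvWitness_solution : List String × List String × Int := (["muzi", "frodo", "apeach"], ["muzi frodo", "apeach frodo", "muzi frodo"], 2)

def Spec_solution (id_list : List String) (report : List String) (k : Int) (out : List Int) : Prop := out = solution_alt id_list report k
instance (id_list : List String) (report : List String) (k : Int) (out : List Int) : Decidable (Spec_solution id_list report k out) := by unfold Spec_solution; infer_instance

-- ===== CLAIM (what is proved, stated in full; the proofs are below) =====
def Claim_equal_solution : Prop := ∀ (id_list : List String) (report : List String) (k : Int), Dom_solution id_list report k → Pre_solution id_list report k → Spec_solution id_list report k (solution id_list report k)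

-- ===== LEMMAS AND PROOFS =====

-- a dict seeded with 0 for every listed key reads 0 everywhere
theorem getD_seed_zero (l : List String) (d : PySem.Dict String Int) (u : String)
    (h : d.getD u 0 = 0) :
    (l.foldl (fun d name => d.insert name 0) d).getD u 0 = 0 := by
  induction l generalizing d with
  | nil => simpa using h
  | cons x xs ih =>
      simp only [List.foldl_cons]
      exact ih _ (by rw [PySem.Dict.getD_insert]; split_ifs <;> simp_all)

-- a dict seeded with ∅ for every listed key reads ∅ everywhere
theorem getD_seed_empty (l : List String) (d : PySem.Dict String (PySem.Set String)) (u : String)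
    (h : d.getD u PySem.Set.empty = PySem.Set.empty) :
    (l.foldl (fun d name => d.insert name PySem.Set.empty) d).getD u PySem.Set.empty = PySem.Set.empty := by
  induction l generalizing d with
  | nil => simpa using h
  | cons x xs ih =>
      simp only [List.foldl_cons]
      exact ih _ (by rw [PySem.Dict.getD_insert]; split_ifs <;> simp_all)

-- A's pair-state loop is the pair of the two independent loops
theorem foldl_pair_split (E : List (String × String))
    (rd : PySem.Dict String (PySem.Set String)) (cd : PySem.Dict String Int) :
    E.foldl (fun rc e =>
      (rc.1.insert e.1 (PySem.Set.add (rc.1.getD e.1 PySem.Set.empty) e.2),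
       rc.2.insert e.2 (rc.2.getD e.2 0 + 1))) (rd, cd)
    = (E.foldl (fun d e => d.insert e.1 (PySem.Set.add (d.getD e.1 PySem.Set.empty) e.2)) rd,
       E.foldl (fun d e => d.insert e.2 (d.getD e.2 0 + 1)) cd) := by
  induction E generalizing rd cd with
  | nil => rfl
  | cons e t ih => simp only [List.foldl_cons]; exact ih _ _

-- the per-reporter set loop: each bucket collects, in order, the seconds of its edges
theorem rd_spec (E : List (String × String)) (rd : PySem.Dict String (PySem.Set String))
    (hE : E.Nodup)
    (hfresh : ∀ n u, u ∈ (rd.getD n PySem.Set.empty : List String) → (n, u) ∉ E) :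
    ∀ n, ((E.foldl (fun d e => d.insert e.1 (PySem.Set.add (d.getD e.1 PySem.Set.empty) e.2)) rd).getD n PySem.Set.empty : List String)
      = (rd.getD n PySem.Set.empty : List String) ++ (E.filter (fun e => e.1 == n)).map (fun e => e.2) := by
  induction E generalizing rd with
  | nil => simp
  | cons e t ih =>
      intro n
      have hnotmem : e.2 ∉ (rd.getD e.1 PySem.Set.empty : List String) := by
        intro hmem
        exact hfresh e.1 e.2 hmem (by simp)
      have hadd : PySem.Set.add (rd.getD e.1 PySem.Set.empty) e.2
          = (rd.getD e.1 PySem.Set.empty : List String) ++ [e.2] :=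
        PySem.Set.add_of_not_mem hnotmem
      have hfresh' : ∀ n u, u ∈ ((rd.insert e.1 (PySem.Set.add (rd.getD e.1 PySem.Set.empty) e.2)).getD n PySem.Set.empty : List String) → (n, u) ∉ t := by
        intro n u hu
        rw [PySem.Dict.getD_insert] at hu
        by_cases hne : n = e.1
        · rw [if_pos hne, hadd] at hu
          rcases List.mem_append.mp hu with h1 | h2
          · intro ht; exact hfresh n u (by rw [hne]; exact h1) (List.mem_cons_of_mem _ ht)
          · have hu2 : u = e.2 := by simpa using h2
            intro ht
            apply (List.nodup_cons.mp hE).1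
            have hpe : (n, u) = e := by simp [hne, hu2]
            rwa [hpe] at ht
        · rw [if_neg hne] at hu
          intro ht; exact hfresh n u hu (List.mem_cons_of_mem _ ht)
      have ihres := ih (rd.insert e.1 (PySem.Set.add (rd.getD e.1 PySem.Set.empty) e.2))
        (List.nodup_cons.mp hE).2 hfresh' n
      simp only [List.foldl_cons]
      rw [ihres, PySem.Dict.getD_insert]
      by_cases hne : n = e.1
      · subst hne
        rw [if_pos rfl, hadd, List.filter_cons, if_pos (by simp)]
        simp
      · rw [if_neg hne, List.filter_cons, if_neg (by simpa using Ne.symm hne)]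

-- the count dict built over pairs counts the second components
theorem cd_getD (E : List (String × String)) (cd : PySem.Dict String Int) (u : String) :
    (E.foldl (fun d e => d.insert e.2 (d.getD e.2 0 + 1)) cd).getD u 0
      = cd.getD u 0 + (E.map (fun e => e.2)).count u := by
  induction E generalizing cd with
  | nil => simp
  | cons e t ih =>
      simp only [List.foldl_cons, List.map_cons]
      rw [ih, PySem.Dict.getD_insert, List.count_cons]
      by_cases h : u = e.2
      · rw [if_pos h]; simp [h]; ring
      · rw [if_neg h]; simp [Ne.symm h]

-- an indicator-accumulating foldl is a countP
theorem foldl_ind_countP {α : Type} (L : List α) (p : α → Prop) [DecidablePred p] (a : Int) :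
    L.foldl (fun s x => s + (if p x then 1 else 0)) a = a + (L.countP (fun x => decide (p x)) : Int) := by
  induction L generalizing a with
  | nil => simp
  | cons x t ih =>
      simp only [List.foldl_cons, List.countP_cons]
      rw [ih]
      by_cases h : p x <;> simp [h] <;> push_cast <;> ring

-- a Bool-indicator-accumulating foldl is a countP
theorem foldl_indb_countP {α : Type} (L : List α) (p : α → Bool) (a : Int) :
    L.foldl (fun s x => s + (if p x then (1:Int) else 0)) a = a + (L.countP p : Int) := by
  induction L generalizing a with
  | nil => simp
  | cons x t ih =>
      simp only [List.foldl_cons, List.countP_cons]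
      rw [ih]
      by_cases h : p x = true <;> simp [h] <;> push_cast <;> ring

-- B's dedupe-append loop builds exactly A's insertion-ordered set
theorem edges_eq (report : List String) :
    (report.foldl (fun es r =>
      let parts := PySem.Str.split₀ r
      let e := (parts.getD 0 "", parts.getD 1 "")
      if e ∈ es then es else es ++ [e]) ([] : List (String × String)))
    = (report.foldl (fun s r =>
      let parts := PySem.Str.split₀ r
      PySem.Set.add s (parts.getD 0 "", parts.getD 1 "")) PySem.Set.empty : List (String × String)) := by
  have hstep : ∀ (es : List (String × String)) (r : String),
      (let parts := PySem.Str.split₀ r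
       let e := (parts.getD 0 "", parts.getD 1 "")
       if e ∈ es then es else es ++ [e])
      = PySem.Set.add es ((PySem.Str.split₀ r).getD 0 "", (PySem.Str.split₀ r).getD 1 "") := by
    intro es r
    simp only [PySem.Set.add]
    by_cases h : ((PySem.Str.split₀ r).getD 0 "", (PySem.Str.split₀ r).getD 1 "") ∈ es
    · rw [if_pos h, if_pos ((PySem.Set.contains_iff _ _).mpr h)]
    · rw [if_neg h, if_neg (fun hc => h ((PySem.Set.contains_iff _ _).mp hc))]
  apply PySem.List.foldl_congr_mem
  intro es r _
  exact hstep es r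

-- the two programs agree for every deduplicated edge list
theorem core (E : List (String × String)) (id_list : List String) (k : Int) (hE : E.Nodup) :
    id_list.foldl (fun answer name =>
      answer ++ [((E.foldl (fun rc e =>
          (rc.1.insert e.1 (PySem.Set.add (rc.1.getD e.1 PySem.Set.empty) e.2),
           rc.2.insert e.2 (rc.2.getD e.2 0 + 1)))
          (id_list.foldl (fun d name => d.insert name PySem.Set.empty) PySem.Dict.empty,
           id_list.foldl (fun d name => d.insert name (0:Int)) PySem.Dict.empty)).1.getD name PySem.Set.empty).foldl
        (fun cnt reported => cnt + (if (E.foldl (fun rc e =>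
          (rc.1.insert e.1 (PySem.Set.add (rc.1.getD e.1 PySem.Set.empty) e.2),
           rc.2.insert e.2 (rc.2.getD e.2 0 + 1)))
          (id_list.foldl (fun d name => d.insert name PySem.Set.empty) PySem.Dict.empty,
           id_list.foldl (fun d name => d.insert name (0:Int)) PySem.Dict.empty)).2.getD reported 0 ≥ k then 1 else 0)) (0:Int)]) ([] : List Int)
    = id_list.map (fun name =>
        E.foldl (fun s e => s + (if e.1 == name && ((E.map (fun e => e.2)).filter (fun b => ((E.map (fun e => e.2)).count b : Int) ≥ k)).contains e.2 then (1:Int) else 0)) 0) := by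
  have hsplit := foldl_pair_split E
    (id_list.foldl (fun d name => d.insert name PySem.Set.empty) PySem.Dict.empty)
    (id_list.foldl (fun d name => d.insert name (0:Int)) PySem.Dict.empty)
  rw [hsplit]
  dsimp only
  rw [PySem.List.foldl_append_singleton_eq_map]
  rw [List.nil_append]
  apply List.map_congr_left
  intro n hn
  have hrd0 : ((id_list.foldl (fun d name => d.insert name PySem.Set.empty) PySem.Dict.empty : PySem.Dict String (PySem.Set String)).getD n PySem.Set.empty : List String) = [] :=
    getD_seed_empty id_list PySem.Dict.empty n (PySem.Dict.getD_empty n PySem.Set.empty)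
  rw [rd_spec E _ hE (by intro m u hu; rw [getD_seed_empty id_list PySem.Dict.empty m (PySem.Dict.getD_empty m PySem.Set.empty)] at hu; cases hu) n]
  rw [hrd0, List.nil_append]
  set cd : PySem.Dict String Int := E.foldl (fun d e => d.insert e.2 (d.getD e.2 0 + 1))
    (id_list.foldl (fun d name => d.insert name (0:Int)) PySem.Dict.empty) with hcdset
  set bn : List String := (E.map (fun e => e.2)).filter (fun b => ((E.map (fun e => e.2)).count b : Int) ≥ k) with hbnset
  -- A's side: a countP over the bucket
  rw [foldl_ind_countP ((E.filter (fun e => e.1 == n)).map (fun e => e.2))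
      (fun u => cd.getD u 0 ≥ k) 0]
  -- B's side: a countP over the edges
  rw [foldl_indb_countP E (fun e => e.1 == n && bn.contains e.2) 0]
  rw [zero_add, zero_add]
  congr 1
  rw [List.countP_map, List.countP_filter]
  apply List.countP_congr
  intro e he
  have hcd : cd.getD e.2 0 = ((E.map (fun e => e.2)).count e.2 : Int) := by
    rw [hcdset, cd_getD, getD_seed_zero id_list PySem.Dict.empty e.2 (PySem.Dict.getD_empty e.2 0), zero_add]
  have hmem : e.2 ∈ E.map (fun e => e.2) := List.mem_map.mpr ⟨e, he, rfl⟩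
  simp only [Function.comp_apply, Bool.and_eq_true, beq_iff_eq, decide_eq_true_eq,
    List.contains_iff_mem, hbnset, List.mem_filter]
  rw [hcd]
  constructor
  · rintro ⟨h1, h2⟩
    exact ⟨h2, hmem, by simpa using h1⟩
  · rintro ⟨h1, _, h3⟩
    exact ⟨by simpa using h3, h1⟩

-- ===== VERDICT (by name: the statement is the Claim_ definition above) =====
theorem solution_spec : Claim_equal_solution := by
  intro id_list report k _ _
  show _ = solution_alt id_list report k
  unfold solution solution_alt
  rw [edges_eq]
  have hE : (report.foldl (fun s r =>
      let parts := PySem.Str.split₀ r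
      PySem.Set.add s (parts.getD 0 "", parts.getD 1 "")) PySem.Set.empty : List (String × String)).Nodup := by
    rw [show (report.foldl (fun s r =>
        let parts := PySem.Str.split₀ r
        PySem.Set.add s (parts.getD 0 "", parts.getD 1 "")) PySem.Set.empty : List (String × String))
      = PySem.Set.ofList (report.map (fun r => ((PySem.Str.split₀ r).getD 0 "", (PySem.Str.split₀ r).getD 1 ""))) from by
        rw [PySem.Set.ofList_eq_foldl, List.foldl_map]
        rfl]
    exact PySem.Set.nodup_ofList _
  exact core _ id_list k hE
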